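-- pv_equiv track=rewrite | github.com/Oceannnnnnnn/spark-otp-Miner | python/ntp_Miner_spark1.py | gen_candidate
-- ===== SOURCE A (Python) =====
-- def binary_search(fre, cand, level):
--     low, high = 0, len(fre) - 1
--     if low > high:
--         return -1
--     while low < high:
--         mid = int((low + high) / 2)
--         if cand <= fre[mid][0:level - 1]:
--             high = mid
--         else:
--             low = mid + 1
--     if cand == fre[low][0:level - 1]:
--         return low
--     elif low + 1 < len(fre) and cand == fre[low + 1][0:level - 1]:
--         return low + 1
--     else:
--         return -1
--
-- def gen_candidate(fre, level):
--     candidate = []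
--     start = 0
--     for model in fre:
--         R = model[1:level]
--         Q = fre[start][0:level - 1]
--         if Q != R:
--             start = binary_search(fre, R, level)
--         if start < 0 or start >= len(fre):
--             start = 0
--         else:
--             Q = fre[start][0:level - 1]
--             while Q == R:
--                 candidate.append(model[0:level] + fre[start][level - 1:level])
--                 start = start + 1
--                 if start >= len(fre):
--                     start = 0
--                     break
--                 Q = fre[start][0:level - 1]
--     return candidate
-- ===== SOURCE B (Python) =====
-- def gen_candidate(fre, level):
--     n = len(fre)
--     if n == 0:
--         return []
--     pref = [tuple(m[0:level - 1]) for m in fre]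
--     ext = [m[level - 1:level] for m in fre]
--     # run table: nxt[i] = first index after i whose prefix differs (n at the end)
--     nxt = [n] * n
--     for i in range(n - 2, -1, -1):
--         nxt[i] = nxt[i + 1] if pref[i] == pref[i + 1] else i + 1
--
--     def locate(r):
--         # recursive lower-bound bisection over the precomputed prefixes
--         def lb(lo, hi):
--             if lo >= hi:
--                 return lo
--             mid = (lo + hi) // 2
--             return lb(lo, mid) if r <= pref[mid] else lb(mid + 1, hi)
--         low = lb(0, n - 1)
--         if pref[low] == r:
--             return low
--         if low + 1 < n and pref[low + 1] == r:
--             return low + 1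
--         return -1
--
--     # stage 1: spans of emissions (head, s, e); searches memoised in a dict
--     cache = {}
--     spans = []
--     start = 0
--     for model in fre:
--         r = tuple(model[1:level])
--         if pref[start] != r:
--             if r not in cache:
--                 cache[r] = locate(r)
--             s = cache[r]
--             if s == -1:
--                 start = 0
--                 continue
--             start = s
--         e = nxt[start]
--         spans.append((model[0:level], start, e))
--         start = e if e < n else 0
--     # stage 2: flat emission
--     return [h + ext[i] for (h, s, e) in spans for i in range(s, e)]
-- ===== Notes on version B (the rewrite author's own statement) =====
-- stated objective: alternative
-- what changed: B is staged instead of interleaved: it precomputes prefix/extension slices and a run table, memoises each distinct suffix's bisection result in a dict so repeated searches disappear, records only (head,start,end) spans in its pass over the models, and emits the whole output in a final flat comprehension, replacing A's per-model binary search with re-slicing comparisons and its inner append-one-at-a-time while-loop; it trades extra precomputation passes for cheaper per-model work.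
import Mathlib
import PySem

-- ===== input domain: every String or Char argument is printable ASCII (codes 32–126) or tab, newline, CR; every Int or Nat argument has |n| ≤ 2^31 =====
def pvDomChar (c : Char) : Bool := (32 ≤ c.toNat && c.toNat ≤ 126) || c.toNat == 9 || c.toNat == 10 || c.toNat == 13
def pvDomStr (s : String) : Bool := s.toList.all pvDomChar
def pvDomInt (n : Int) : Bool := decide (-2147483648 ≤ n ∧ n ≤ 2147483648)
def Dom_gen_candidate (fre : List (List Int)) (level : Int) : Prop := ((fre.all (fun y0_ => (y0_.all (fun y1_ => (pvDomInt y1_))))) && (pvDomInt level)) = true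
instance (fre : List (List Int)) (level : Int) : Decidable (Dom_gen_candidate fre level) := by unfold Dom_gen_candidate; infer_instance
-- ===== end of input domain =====

-- B is staged instead of interleaved: precomputed slices and a run table, a dict memoising each
-- distinct suffix's bisection, a span-collecting pass, then one flat emission; an alternative
-- decomposition with the exact same return value.

-- ===== PORT A =====

-- Python's 'xs <= ys' on lists of ints (lexicographic, shorter prefix is smaller); used by both ports.
def pyListLe : List Int → List Int → Bool
  | [], _ => true
  | _ :: _, [] => false
  | x :: xs, y :: ys => if x < y then true else if y < x then false else pyListLe xs ys

-- 'while low < high: mid = int((low+high)/2) …', fuel = (high-low).toNat: the gap shrinks by at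
-- least 1 per iteration, so the loop's exit (low = high) is always reached before fuel runs out;
-- low, high stay ≥ 0, so floordiv is exact for int(x/2)
def bsLoop (fre : List (List Int)) (cand : List Int) (level : Int) :
    Nat → Int → Int → Int
  | 0, low, _ => low
  | fuel + 1, low, high =>
    if low < high then
      let mid := PySem.Int.floordiv (low + high) 2
      if pyListLe cand (PySem.List.slice (PySem.List.pyGetD fre mid []) (some 0) (some (level - 1)))
      then bsLoop fre cand level fuel low mid
      else bsLoop fre cand level fuel (mid + 1) high
    else low

def binary_search (fre : List (List Int)) (cand : List Int) (level : Int) : Int :=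
  let low : Int := 0
  let high : Int := (fre.length : Int) - 1
  if low > high then -1
  else
    let low := bsLoop fre cand level (high - low).toNat low high
    if cand = PySem.List.slice (PySem.List.pyGetD fre low []) (some 0) (some (level - 1)) then low
    else if low + 1 < (fre.length : Int) ∧
        cand = PySem.List.slice (PySem.List.pyGetD fre (low + 1) []) (some 0) (some (level - 1)) then
      low + 1
    else -1

-- the inner 'while Q == R: append; start += 1; wrap' loop of A; fuel = fre.length - start, which
-- stays positive at every call (start advances by 1 per iteration and the loop stops at the end)
def innerA (fre : List (List Int)) (level : Int) (R model : List Int) :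
    Nat → Nat → List (List Int) → List (List Int) × Int
  | 0, start, acc => (acc, (start : Int))   -- never reached from stepA
  | fuel + 1, start, acc =>
    let Q := PySem.List.slice (PySem.List.pyGetD fre (start : Int) []) (some 0) (some (level - 1))
    if Q = R then
      let acc := acc ++ [PySem.List.slice model (some 0) (some level) ++
        PySem.List.slice (PySem.List.pyGetD fre (start : Int) []) (some (level - 1)) (some level)]
      if fre.length ≤ start + 1 then (acc, 0)
      else innerA fre level R model fuel (start + 1) acc
    else (acc, (start : Int))

def stepA (fre : List (List Int)) (level : Int) (st : List (List Int) × Int)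
    (model : List Int) : List (List Int) × Int :=
  let R := PySem.List.slice model (some 1) (some level)
  let Q := PySem.List.slice (PySem.List.pyGetD fre st.2 []) (some 0) (some (level - 1))
  let start := if Q ≠ R then binary_search fre R level else st.2
  if start < 0 ∨ (fre.length : Int) ≤ start then (st.1, 0)
  else innerA fre level R model (fre.length - start.toNat) start.toNat st.1
    -- 0 ≤ start < len was just checked, so toNat is exact and the fuel is positive

def gen_candidate (fre : List (List Int)) (level : Int) : List (List Int) :=
  (fre.foldl (stepA fre level) ([], 0)).1

-- ===== PORT B =====

-- the recursive lower-bound 'lb' of Source B; fuel = (hi-lo).toNat, same scheme as A's loop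
def findLoop (pref : List (List Int)) (r : List Int) : Nat → Int → Int → Int
  | 0, lo, _ => lo
  | fuel + 1, lo, hi =>
    if hi ≤ lo then lo
    else
      let mid := PySem.Int.floordiv (lo + hi) 2
      if pyListLe r (PySem.List.pyGetD pref mid []) then findLoop pref r fuel lo mid
      else findLoop pref r fuel (mid + 1) hi

-- 'locate' of Source B (only called with pref nonempty, after the n == 0 early return)
def findB (pref : List (List Int)) (r : List Int) : Int :=
  let low := findLoop pref r ((pref.length : Int) - 1).toNat 0 ((pref.length : Int) - 1)
  if PySem.List.pyGetD pref low [] = r then low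
  else if low + 1 < (pref.length : Int) ∧ PySem.List.pyGetD pref (low + 1) [] = r then low + 1
  else -1

-- 'nxt[i] = nxt[i+1] if pref[i] == pref[i+1] else i+1', last entry n: Source B's right-to-left filling
-- loop as the structural recursion building the table from the right (i = absolute index of the head)
def buildNxt : List (List Int) → Nat → List Int
  | [], _ => []
  | [_], i => [((i : Int) + 1)]
  | p :: q :: rest, i =>
      let tail := buildNxt (q :: rest) (i + 1)
      (if p = q then tail.headD 0 else ((i : Int) + 1)) :: tail

-- one span's contribution to the output: '[h + ext[i] for i in range(s, e)]'
def emitSpan (ext : List (List Int)) (sp : List Int × Int × Int) : List (List Int) :=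
  (PySem.List.pyRange sp.2.1 sp.2.2 1).map (fun i => sp.1 ++ PySem.List.pyGetD ext i [])

-- stage-1 body: state = (spans, start, cache); searches memoised in the dict 'cache'
def stepB (pref ext : List (List Int)) (nxt : List Int) (n level : Int)
    (st : List (List Int × Int × Int) × Int × PySem.Dict (List Int) Int)
    (model : List Int) : List (List Int × Int × Int) × Int × PySem.Dict (List Int) Int :=
  let r := PySem.List.slice model (some 1) (some level)
  if PySem.List.pyGetD pref st.2.1 [] ≠ r then
    let sc : Int × PySem.Dict (List Int) Int :=
      match PySem.Dict.get? st.2.2 r with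
      | some v => (v, st.2.2)
      | none => (findB pref r, PySem.Dict.insert st.2.2 r (findB pref r))
    if sc.1 = -1 then (st.1, 0, sc.2)
    else
      let e := PySem.List.pyGetD nxt sc.1 0
      (st.1 ++ [(PySem.List.slice model (some 0) (some level), sc.1, e)],
        (if e < n then e else 0), sc.2)
  else
    let e := PySem.List.pyGetD nxt st.2.1 0
    (st.1 ++ [(PySem.List.slice model (some 0) (some level), st.2.1, e)],
      (if e < n then e else 0), st.2.2)

def gen_candidate_alt (fre : List (List Int)) (level : Int) : List (List Int) :=
  if fre.length = 0 then []
  else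
    let pref := fre.map (fun m => PySem.List.slice m (some 0) (some (level - 1)))
    let ext := fre.map (fun m => PySem.List.slice m (some (level - 1)) (some level))
    let nxt := buildNxt pref 0
    let res := fre.foldl (stepB pref ext nxt (fre.length : Int) level)
      ([], 0, PySem.Dict.empty)
    res.1.flatMap (emitSpan ext)

-- ===== PRECONDITION & SPEC =====
def Spec_gen_candidate (fre : List (List Int)) (level : Int) (out : List (List Int)) : Prop := out = gen_candidate_alt fre level
instance (fre : List (List Int)) (level : Int) (out : List (List Int)) : Decidable (Spec_gen_candidate fre level out) := by unfold Spec_gen_candidate; infer_instance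

-- ===== CLAIM (what is proved, stated in full; the proofs are below) =====
def Claim_equal_gen_candidate : Prop := ∀ (fre : List (List Int)) (level : Int), Dom_gen_candidate fre level → Spec_gen_candidate fre level (gen_candidate fre level)

-- ===== LEMMAS AND PROOFS =====

-- the two slice projections B precomputes
def prefF (level : Int) (m : List Int) : List Int := PySem.List.slice m (some 0) (some (level - 1))
def extF (level : Int) (m : List Int) : List Int := PySem.List.slice m (some (level - 1)) (some level)

-- correctness of the memo dict: every stored value is the pure search's value
def cacheOK (pref : List (List Int)) (c : PySem.Dict (List Int) Int) : Prop :=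
  ∀ r v, c.get? r = some v → v = findB pref r

lemma prefF_nil (level : Int) : prefF level [] = [] := by
  simp [prefF, PySem.List.slice]

lemma extF_nil (level : Int) : extF level [] = [] := by
  simp [extF, PySem.List.slice]

-- indexing fre then slicing = indexing the precomputed slice list
lemma pref_lookup (fre : List (List Int)) (level s : Int) :
    PySem.List.slice (PySem.List.pyGetD fre s []) (some 0) (some (level - 1)) =
      PySem.List.pyGetD (fre.map (prefF level)) s [] := by
  have h := PySem.List.pyGetD_map (prefF level) fre s []
  rw [prefF_nil] at h
  exact h.symm

lemma ext_lookup (fre : List (List Int)) (level s : Int) :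
    PySem.List.slice (PySem.List.pyGetD fre s []) (some (level - 1)) (some level) =
      PySem.List.pyGetD (fre.map (extF level)) s [] := by
  have h := PySem.List.pyGetD_map (extF level) fre s []
  rw [extF_nil] at h
  exact h.symm

-- A's bisection over fre = B's bisection over the precomputed prefixes
lemma bs_eq_find (fre : List (List Int)) (cand : List Int) (level : Int) :
    ∀ (fuel : Nat) (low high : Int),
      bsLoop fre cand level fuel low high = findLoop (fre.map (prefF level)) cand fuel low high := by
  intro fuel
  induction fuel with
  | zero => intro low high; rfl
  | succ fuel ih =>
    intro low high
    simp only [bsLoop, findLoop, pref_lookup]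
    by_cases h : low < high
    · rw [if_pos h, if_neg (by omega : ¬ high ≤ low)]
      split_ifs <;> simp [ih]
    · rw [if_neg h, if_pos (by omega : high ≤ low)]

lemma binary_search_eq_findB (fre : List (List Int)) (cand : List Int) (level : Int)
    (h : fre ≠ []) :
    binary_search fre cand level = findB (fre.map (prefF level)) cand := by
  have hl : 0 < fre.length := List.length_pos_iff.mpr h
  simp only [binary_search, findB, List.length_map, bs_eq_find, pref_lookup, sub_zero, eq_comm]
  rw [if_neg (by omega : ¬ ((0 : Int) > (fre.length : Int) - 1))]

lemma findLoop_bounds (pref : List (List Int)) (r : List Int) :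
    ∀ (fuel : Nat) (low high : Int), low ≤ high →
      low ≤ findLoop pref r fuel low high ∧ findLoop pref r fuel low high ≤ high := by
  intro fuel
  induction fuel with
  | zero => intro low high h; exact ⟨le_refl _, h⟩
  | succ fuel ih =>
    intro low high h
    simp only [findLoop]
    split_ifs with h1 h2
    · exact ⟨le_refl _, h⟩
    · have hm := PySem.Int.floordiv_two_mid_bounds (by omega : low ≤ high)
      have := ih low (PySem.Int.floordiv (low + high) 2) hm.1
      exact ⟨this.1, le_trans this.2 hm.2⟩
    · have hm : PySem.Int.floordiv (low + high) 2 < high :=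
        (PySem.Int.floordiv_lt_iff_lt_mul (by omega)).mpr (by omega)
      have hl := PySem.Int.floordiv_two_mid_bounds (by omega : low ≤ high)
      have := ih (PySem.Int.floordiv (low + high) 2 + 1) high (by omega)
      exact ⟨by omega, this.2⟩

lemma findB_range (pref : List (List Int)) (r : List Int) (h : pref ≠ []) :
    findB pref r = -1 ∨ (0 ≤ findB pref r ∧ findB pref r < (pref.length : Int)) := by
  have hl : 0 < pref.length := List.length_pos_iff.mpr h
  have hb := findLoop_bounds pref r ((pref.length : Int) - 1).toNat 0
    ((pref.length : Int) - 1) (by omega)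
  simp only [findB]
  split_ifs with h2 h3
  · right; omega
  · right; omega
  · left; rfl

lemma findB_hit (pref : List (List Int)) (r : List Int) (h : findB pref r ≠ -1) :
    PySem.List.pyGetD pref (findB pref r) [] = r := by
  simp only [findB] at h ⊢
  split_ifs at h ⊢ with h2 h3
  · exact h2
  · exact h3.2
  · exact absurd rfl h

-- bounds of the run table: i + k < nxt[k] ≤ i + n
lemma buildNxt_bounds : ∀ (l : List (List Int)) (i k : Nat), k < l.length →
    (i : Int) + k < (buildNxt l i).getD k 0 ∧ (buildNxt l i).getD k 0 ≤ (i : Int) + l.length := by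
  intro l
  induction l with
  | nil => intro i k hk; simp at hk
  | cons p t ih =>
    intro i k hk
    cases t with
    | nil =>
      cases k with
      | zero => simp [buildNxt]
      | succ k => simp at hk
    | cons q rest =>
      cases k with
      | zero =>
        simp only [buildNxt, List.getD_cons_zero]
        split_ifs with hpq
        · have h0 : (0 : Nat) < (q :: rest).length := by simp
          have := ih (i + 1) 0 h0
          have hh : (buildNxt (q :: rest) (i + 1)).headD 0 =
              (buildNxt (q :: rest) (i + 1)).getD 0 0 := by
            cases hb : buildNxt (q :: rest) (i + 1) with
            | nil => simp [hb]
            | cons a b => simp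
          rw [hh]
          push_cast at this ⊢
          constructor <;> [omega; (simp only [List.length_cons] at *; push_cast; omega)]
        · simp only [List.length_cons]
          push_cast
          omega
      | succ k =>
        simp only [buildNxt, List.getD_cons_succ]
        have hk' : k < (q :: rest).length := by simpa using hk
        have := ih (i + 1) k hk'
        simp only [List.length_cons] at *
        push_cast at this ⊢
        omega

-- the recurrence the run table satisfies, at absolute index i + k
lemma buildNxt_get : ∀ (l : List (List Int)) (i k : Nat), k < l.length →
    (buildNxt l i).getD k 0 =
      if k + 1 < l.length then
        (if l.getD k [] = l.getD (k + 1) [] then (buildNxt l i).getD (k + 1) 0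
         else ((i : Int) + k + 1))
      else ((i : Int) + k + 1) := by
  intro l
  induction l with
  | nil => intro i k hk; simp at hk
  | cons p t ih =>
    intro i k hk
    cases t with
    | nil =>
      cases k with
      | zero => simp [buildNxt]
      | succ k => simp at hk
    | cons q rest =>
      cases k with
      | zero =>
        have hh : (buildNxt (q :: rest) (i + 1)).headD 0 =
            (buildNxt (q :: rest) (i + 1)).getD 0 0 := by
          cases buildNxt (q :: rest) (i + 1) with
          | nil => simp
          | cons a b => simp
        have hlen : (0 : Nat) + 1 < (p :: q :: rest).length := by simp
        rw [if_pos hlen]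
        simp only [buildNxt, List.getD_cons_zero, List.getD_cons_succ, hh]
        split_ifs with hpq
        · rfl
        · simp
      | succ k =>
        have hk2 : k < (q :: rest).length := by simpa using hk
        simp only [buildNxt, List.getD_cons_succ]
        rw [ih (i + 1) k hk2]
        by_cases hc : k + 1 < (q :: rest).length
        · have h1 : k + 1 + 1 < (p :: q :: rest).length := by simpa using hc
          rw [if_pos hc, if_pos h1]
          simp only [buildNxt, List.getD_cons_succ]
          split_ifs with he
          · rfl
          · push_cast; ring
        · have h1 : ¬ (k + 1 + 1 < (p :: q :: rest).length) := by simpa using hc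
          rw [if_neg hc, if_neg h1]
          push_cast; ring

-- A's inner while-loop = the contribution of one span of B
lemma inner_eq (fre : List (List Int)) (level : Int) (model R : List Int) :
    ∀ (s : Nat) (acc : List (List Int)), s < fre.length →
      (fre.map (prefF level)).getD s [] = R →
      innerA fre level R model (fre.length - s) s acc =
        (acc ++ emitSpan (fre.map (extF level))
            (PySem.List.slice model (some 0) (some level), (s : Int),
              (buildNxt (fre.map (prefF level)) 0).getD s 0),
          if (buildNxt (fre.map (prefF level)) 0).getD s 0 < (fre.length : Int) then
            (buildNxt (fre.map (prefF level)) 0).getD s 0 else 0) := by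
  have main : ∀ (fuel s : Nat) (acc : List (List Int)), fre.length - s = fuel →
      s < fre.length → (fre.map (prefF level)).getD s [] = R →
      innerA fre level R model (fre.length - s) s acc =
        ((PySem.List.pyRange (s : Int) ((buildNxt (fre.map (prefF level)) 0).getD s 0)).foldl
            (fun acc i => acc ++ [PySem.List.slice model (some 0) (some level) ++
              PySem.List.pyGetD (fre.map (extF level)) i []]) acc,
          if (buildNxt (fre.map (prefF level)) 0).getD s 0 < (fre.length : Int) then
            (buildNxt (fre.map (prefF level)) 0).getD s 0 else 0) := by
    intro fuel
    induction fuel with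
    | zero => intro s acc hf hs _; omega
    | succ fuel ih =>
      intro s acc hf hs hR
      have hsp : s < (fre.map (prefF level)).length := by simpa using hs
      have hQ : PySem.List.slice (PySem.List.pyGetD fre (s : Int) []) (some 0) (some (level - 1))
          = R := by
        rw [pref_lookup, PySem.List.pyGetD_natCast, hR]
      have hacc : acc ++ [PySem.List.slice model (some 0) (some level) ++
            PySem.List.slice (PySem.List.pyGetD fre (s : Int) []) (some (level - 1)) (some level)]
          = acc ++ [PySem.List.slice model (some 0) (some level) ++
            PySem.List.pyGetD (fre.map (extF level)) (s : Int) []] := by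
        rw [ext_lookup]
      have hget := buildNxt_get (fre.map (prefF level)) 0 s hsp
      have hbnd := buildNxt_bounds (fre.map (prefF level)) 0 s hsp
      rw [hf]
      simp only [innerA]
      rw [hQ, if_pos (rfl : R = R)]
      by_cases hend : fre.length ≤ s + 1
      · -- last element of the list: the run ends at n, the loop wraps start to 0
        have hnxt : (buildNxt (fre.map (prefF level)) 0).getD s 0 = (s : Int) + 1 := by
          rw [hget, if_neg (by simpa using (by omega : ¬ (s + 1 < fre.length)))]
          push_cast; ring
        rw [if_pos hend, hnxt]
        have hrange : PySem.List.pyRange (s : Int) ((s : Int) + 1) = [(s : Int)] := by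
          rw [PySem.List.pyRange_one_cons (by omega), PySem.List.pyRange_one_eq_nil (by omega)]
        rw [hrange]
        simp only [List.foldl_cons, List.foldl_nil]
        rw [if_neg (by omega : ¬ ((s : Int) + 1 < (fre.length : Int)))]
        exact congrArg (fun l => (l, (0 : Int))) hacc
      · rw [if_neg hend]
        have hs1p : s + 1 < (fre.map (prefF level)).length := by simpa using (by omega : s + 1 < fre.length)
        by_cases hpq : (fre.map (prefF level)).getD (s + 1) [] = R
        · -- next entry has the same prefix: the run continues
          have hnxt : (buildNxt (fre.map (prefF level)) 0).getD s 0 =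
              (buildNxt (fre.map (prefF level)) 0).getD (s + 1) 0 := by
            rw [hget, if_pos (by simpa using (by omega : s + 1 < fre.length)),
              if_pos (by rw [hR, hpq])]
          have := ih (s + 1) (acc ++ [PySem.List.slice model (some 0) (some level) ++
              PySem.List.pyGetD (fre.map (extF level)) (s : Int) []]) (by omega) (by omega) hpq
          rw [hacc]
          have hfuel : fre.length - (s + 1) = fuel := by omega
          rw [← hfuel] at *
          rw [this, hnxt]
          have hbnd1 := buildNxt_bounds (fre.map (prefF level)) 0 (s + 1) hs1p
          have hrange : PySem.List.pyRange (s : Int)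
                ((buildNxt (fre.map (prefF level)) 0).getD (s + 1) 0) =
              (s : Int) :: PySem.List.pyRange ((s : Int) + 1)
                ((buildNxt (fre.map (prefF level)) 0).getD (s + 1) 0) := by
            apply PySem.List.pyRange_one_cons
            have hlow := hbnd1.1
            push_cast at hlow
            omega
          rw [hrange]
          simp only [List.foldl_cons]
          push_cast
          rfl
        · -- next entry breaks the run: the loop stops there
          have hnxt : (buildNxt (fre.map (prefF level)) 0).getD s 0 = (s : Int) + 1 := by
            rw [hget, if_pos (by simpa using (by omega : s + 1 < fre.length)),
              if_neg (fun h => hpq (by rw [← h]; exact hR))]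
            push_cast; ring
          have hfuel : fre.length - (s + 1) = fuel := by omega
          obtain ⟨f', hf'⟩ : ∃ f', fuel = f' + 1 := ⟨fre.length - (s + 2), by omega⟩
          have hQ1 : PySem.List.slice (PySem.List.pyGetD fre ((s : Int) + 1) [])
              (some 0) (some (level - 1)) = (fre.map (prefF level)).getD (s + 1) [] := by
            rw [pref_lookup]
            have : ((s : Int) + 1) = ((s + 1 : Nat) : Int) := by push_cast; ring
            rw [this, PySem.List.pyGetD_natCast]
          have hcast : ((s + 1 : Nat) : Int) = (s : Int) + 1 := by push_cast; ring
          rw [hf']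
          simp only [innerA]
          rw [hcast, hQ1, if_neg hpq, hnxt]
          have hrange : PySem.List.pyRange (s : Int) ((s : Int) + 1) = [(s : Int)] := by
            rw [PySem.List.pyRange_one_cons (by omega), PySem.List.pyRange_one_eq_nil (by omega)]
          rw [hrange]
          simp only [List.foldl_cons, List.foldl_nil]
          rw [if_pos (by omega : (s : Int) + 1 < (fre.length : Int)), hacc]
  intro s acc hs hR
  rw [main (fre.length - s) s acc rfl hs hR, emitSpan,
    PySem.List.foldl_append_singleton_eq_map]

-- one outer-loop iteration of A corresponds to one span step of B; the start index stays in
-- [0, n) and the memo dict stays correct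
lemma step_eq (fre : List (List Int)) (level : Int) (model : List Int)
    (spans : List (List Int × Int × Int)) (start : Int)
    (cache : PySem.Dict (List Int) Int)
    (h0 : 0 ≤ start) (h1 : start < (fre.length : Int))
    (hc : cacheOK (fre.map (prefF level)) cache) :
    (stepA fre level ((spans.flatMap (emitSpan (fre.map (extF level)))), start) model).1 =
      ((stepB (fre.map (prefF level)) (fre.map (extF level))
          (buildNxt (fre.map (prefF level)) 0) (fre.length : Int) level
          (spans, start, cache) model).1).flatMap (emitSpan (fre.map (extF level))) ∧
    (stepA fre level ((spans.flatMap (emitSpan (fre.map (extF level)))), start) model).2 =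
      (stepB (fre.map (prefF level)) (fre.map (extF level))
          (buildNxt (fre.map (prefF level)) 0) (fre.length : Int) level
          (spans, start, cache) model).2.1 ∧
    0 ≤ (stepA fre level ((spans.flatMap (emitSpan (fre.map (extF level)))), start) model).2 ∧
    (stepA fre level ((spans.flatMap (emitSpan (fre.map (extF level)))), start) model).2 <
      (fre.length : Int) ∧
    cacheOK (fre.map (prefF level))
      (stepB (fre.map (prefF level)) (fre.map (extF level))
          (buildNxt (fre.map (prefF level)) 0) (fre.length : Int) level
          (spans, start, cache) model).2.2 := by
  have hne : fre ≠ [] := by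
    intro h; rw [h] at h1; simp at h1; omega
  have hlenp : (fre.map (prefF level)).length = fre.length := by simp
  obtain ⟨k, rfl⟩ : ∃ k : Nat, start = (k : Int) :=
    ⟨start.toNat, (Int.toNat_of_nonneg h0).symm⟩
  set R := PySem.List.slice model (some 1) (some level) with hRdef
  set out := spans.flatMap (emitSpan (fre.map (extF level))) with houtdef
  -- emission at a valid matching start s
  have hemit : ∀ (s : Nat), s < fre.length → (fre.map (prefF level)).getD s [] = R →
      innerA fre level R model (fre.length - s) s out =
        ((spans ++ [(PySem.List.slice model (some 0) (some level), (s : Int),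
            PySem.List.pyGetD (buildNxt (fre.map (prefF level)) 0) (s : Int) 0)]).flatMap
              (emitSpan (fre.map (extF level))),
          if PySem.List.pyGetD (buildNxt (fre.map (prefF level)) 0) (s : Int) 0 <
              (fre.length : Int) then
            PySem.List.pyGetD (buildNxt (fre.map (prefF level)) 0) (s : Int) 0 else 0) ∧
      0 ≤ (innerA fre level R model (fre.length - s) s out).2 ∧
      (innerA fre level R model (fre.length - s) s out).2 < (fre.length : Int) := by
    intro s hs hR
    have hie := inner_eq fre level model R s out hs hR
    have hbnd := buildNxt_bounds (fre.map (prefF level)) 0 s (by omega)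
    have hcast : PySem.List.pyGetD (buildNxt (fre.map (prefF level)) 0) (s : Int) 0 =
        (buildNxt (fre.map (prefF level)) 0).getD s 0 := PySem.List.pyGetD_natCast _ _ _
    refine ⟨?_, ?_⟩
    · rw [hie, hcast]
      simp [List.flatMap_append, houtdef]
    · rw [hie]
      have hb1 := hbnd.1
      have hb2 := hbnd.2
      push_cast at hb1 hb2
      dsimp only
      split_ifs with hj
      · omega
      · omega
  by_cases hq : PySem.List.pyGetD (fre.map (prefF level)) (k : Int) [] = R
  · -- prefix at the current start already matches: neither side searches
    have hq' : (fre.map (prefF level)).getD k [] = R := by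
      rw [← PySem.List.pyGetD_natCast]; exact hq
    have hQ : PySem.List.slice (PySem.List.pyGetD fre (k : Int) []) (some 0) (some (level - 1))
        = R := by
      rw [pref_lookup]; exact hq
    have hA : stepA fre level (out, (k : Int)) model =
        innerA fre level R model (fre.length - k) k out := by
      simp only [stepA, ← hRdef]
      rw [if_neg (not_not_intro hQ),
        if_neg (by omega : ¬ ((k : Int) < 0 ∨ (fre.length : Int) ≤ (k : Int)))]
      simp
    have hB : stepB (fre.map (prefF level)) (fre.map (extF level))
        (buildNxt (fre.map (prefF level)) 0) (fre.length : Int) level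
        (spans, (k : Int), cache) model =
        (spans ++ [(PySem.List.slice model (some 0) (some level), (k : Int),
            PySem.List.pyGetD (buildNxt (fre.map (prefF level)) 0) (k : Int) 0)],
          (if PySem.List.pyGetD (buildNxt (fre.map (prefF level)) 0) (k : Int) 0 <
              (fre.length : Int) then
            PySem.List.pyGetD (buildNxt (fre.map (prefF level)) 0) (k : Int) 0 else 0),
          cache) := by
      simp only [stepB, ← hRdef]
      rw [if_neg (not_not_intro hq)]
    have h := hemit k (by omega) hq'
    rw [hA, hB]
    exact ⟨by rw [h.1], by rw [h.1], h.2.1, h.2.2, hc⟩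
  · -- A searches; B consults the memo dict (hit, or computes and stores), same index
    have hQ : ¬ (PySem.List.slice (PySem.List.pyGetD fre (k : Int) []) (some 0)
        (some (level - 1)) = R) := by
      rw [pref_lookup]; exact hq
    have hA : stepA fre level (out, (k : Int)) model =
        (if binary_search fre R level < 0 ∨ (fre.length : Int) ≤ binary_search fre R level
         then (out, 0)
         else innerA fre level R model (fre.length - (binary_search fre R level).toNat)
          (binary_search fre R level).toNat out) := by
      simp only [stepA, ← hRdef]
      rw [if_pos hQ]
    -- resolve B's memo lookup: the obtained index is findB, the dict stays correct
    obtain ⟨s, cache', hs, hcache', hsval⟩ :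
        ∃ s cache', (match PySem.Dict.get? cache R with
            | some v => (v, cache)
            | none => (findB (fre.map (prefF level)) R,
                PySem.Dict.insert cache R (findB (fre.map (prefF level)) R))) = (s, cache') ∧
          cacheOK (fre.map (prefF level)) cache' ∧ s = findB (fre.map (prefF level)) R := by
      cases hcv : PySem.Dict.get? cache R with
      | some v => exact ⟨v, cache, rfl, hc, hc R v hcv⟩
      | none =>
        refine ⟨findB (fre.map (prefF level)) R,
          PySem.Dict.insert cache R (findB (fre.map (prefF level)) R), rfl, ?_, rfl⟩
        intro r' v' hv'
        rw [PySem.Dict.get?_insert] at hv'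
        by_cases hr : r' = R
        · rw [if_pos hr] at hv'; cases hv'; rw [hr]
        · rw [if_neg hr] at hv'; exact hc r' v' hv'
    have hB0 : stepB (fre.map (prefF level)) (fre.map (extF level))
        (buildNxt (fre.map (prefF level)) 0) (fre.length : Int) level
        (spans, (k : Int), cache) model =
        (if s = -1 then (spans, 0, cache')
         else (spans ++ [(PySem.List.slice model (some 0) (some level), s,
            PySem.List.pyGetD (buildNxt (fre.map (prefF level)) 0) s 0)],
          (if PySem.List.pyGetD (buildNxt (fre.map (prefF level)) 0) s 0 <
              (fre.length : Int) then
            PySem.List.pyGetD (buildNxt (fre.map (prefF level)) 0) s 0 else 0), cache')) := by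
      simp only [stepB, ← hRdef]
      rw [if_pos hq, hs]
    have hbs : binary_search fre R level = findB (fre.map (prefF level)) R :=
      binary_search_eq_findB fre R level hne
    rw [hA, hB0, hsval, hbs]
    rcases findB_range (fre.map (prefF level)) R (by simpa using hne) with hneg | hpos
    · rw [hneg]
      rw [if_pos (by omega : (-1 : Int) < 0 ∨ (fre.length : Int) ≤ -1), if_pos rfl]
      exact ⟨rfl, rfl, le_refl _, by omega, hcache'⟩
    · rw [hlenp] at hpos
      obtain ⟨kf, hkf⟩ : ∃ kf : Nat, findB (fre.map (prefF level)) R = (kf : Int) :=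
        ⟨(findB (fre.map (prefF level)) R).toNat, (Int.toNat_of_nonneg hpos.1).symm⟩
      have hfb := findB_hit (fre.map (prefF level)) R (by omega)
      have hq2 : (fre.map (prefF level)).getD kf [] = R := by
        rw [← PySem.List.pyGetD_natCast, ← hkf]; exact hfb
      have h := hemit kf (by omega) hq2
      rw [if_neg (by omega :
          ¬ (findB (fre.map (prefF level)) R < 0 ∨
            (fre.length : Int) ≤ findB (fre.map (prefF level)) R)),
        if_neg (by omega : ¬ (findB (fre.map (prefF level)) R = -1)), hkf]
      simp only [Int.toNat_natCast]
      exact ⟨by rw [h.1], by rw [h.1], h.2.1, h.2.2, hcache'⟩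

-- A's whole fold = stage 1 of B followed by the flat emission, by the step invariant
lemma fold_eq (fre : List (List Int)) (level : Int) :
    ∀ (models : List (List Int)) (spans : List (List Int × Int × Int)) (start : Int)
      (cache : PySem.Dict (List Int) Int),
      0 ≤ start → start < (fre.length : Int) → cacheOK (fre.map (prefF level)) cache →
      (models.foldl (stepA fre level) ((spans.flatMap (emitSpan (fre.map (extF level)))), start)).1 =
        ((models.foldl (stepB (fre.map (prefF level)) (fre.map (extF level))
            (buildNxt (fre.map (prefF level)) 0) (fre.length : Int) level)
          (spans, start, cache)).1).flatMap (emitSpan (fre.map (extF level))) := by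
  intro models
  induction models with
  | nil => intro spans start cache _ _ _; rfl
  | cons m t ih =>
    intro spans start cache h0 h1 hc
    have h := step_eq fre level m spans start cache h0 h1 hc
    obtain ⟨sp', st', ca', hB⟩ :
        ∃ sp' st' ca', stepB (fre.map (prefF level)) (fre.map (extF level))
            (buildNxt (fre.map (prefF level)) 0) (fre.length : Int) level
            (spans, start, cache) m = (sp', st', ca') :=
      ⟨_, _, _, rfl⟩
    rw [hB] at h
    simp only [List.foldl_cons]
    have hAstep : stepA fre level ((spans.flatMap (emitSpan (fre.map (extF level)))), start) m =
        ((sp'.flatMap (emitSpan (fre.map (extF level)))), st') := by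
      have := h.1
      have h2 := h.2.1
      exact Prod.ext this (by simpa using h2)
    rw [hAstep, hB]
    have hb1 : 0 ≤ st' := by
      have hx := h.2.2.1; rw [h.2.1] at hx; simpa using hx
    have hb2 : st' < (fre.length : Int) := by
      have hx := h.2.2.2.1; rw [h.2.1] at hx; simpa using hx
    have hca : cacheOK (fre.map (prefF level)) ca' := by
      have hx := h.2.2.2.2; simpa using hx
    exact ih sp' st' ca' hb1 hb2 hca

-- ===== VERDICT (by name: the statement is the Claim_ definition above) =====
theorem gen_candidate_spec : Claim_equal_gen_candidate := by
  unfold Claim_equal_gen_candidate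
  intro fre level _
  unfold Spec_gen_candidate
  cases fre with
  | nil => rfl
  | cons m t =>
    show ((m :: t).foldl (stepA (m :: t) level) ([], 0)).1 = _
    unfold gen_candidate_alt
    rw [if_neg (by simp : ¬ ((m :: t).length = 0))]
    have hc0 : cacheOK ((m :: t).map (prefF level)) PySem.Dict.empty := by
      intro r v hv
      rw [PySem.Dict.get?_empty] at hv
      cases hv
    have := fold_eq (m :: t) level (m :: t) [] 0 PySem.Dict.empty (by omega) (by simp) hc0
    simpa using this
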